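-- pv_equiv track=rewrite | github.com/Captain-Koteyka/python | les4_task7.py | fibo_gen
-- ===== SOURCE A (Python) =====
-- def fibo_gen(number):
--     idx = 1
--     result = 1
--     if number <= 15:
--         while idx <= number:
--             result *= idx
--             yield result
--             idx += 1
--     else:
--         while idx <= 15:
--             result *= idx
--             yield result
--             idx += 1
--         while idx <= number:
--             result *= idx
--             idx += 1
--         yield result
-- ===== SOURCE B (Python) =====
-- import math
--
-- def fibo_gen(number):
--     if number <= 15:
--         for i in range(1, number + 1):
--             yield math.factorial(i)
--     else:
--         for i in range(1, 16):
--             yield math.factorial(i)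
--         yield math.factorial(number)
-- ===== Notes on version B (the rewrite author's own statement) =====
-- stated objective: idiomatic
-- what changed: Replaced the three hand-rolled while-loops threading a running product (idx, result) with direct calls to math.factorial for each yielded position, keeping only the cutoff branch.
import Mathlib
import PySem

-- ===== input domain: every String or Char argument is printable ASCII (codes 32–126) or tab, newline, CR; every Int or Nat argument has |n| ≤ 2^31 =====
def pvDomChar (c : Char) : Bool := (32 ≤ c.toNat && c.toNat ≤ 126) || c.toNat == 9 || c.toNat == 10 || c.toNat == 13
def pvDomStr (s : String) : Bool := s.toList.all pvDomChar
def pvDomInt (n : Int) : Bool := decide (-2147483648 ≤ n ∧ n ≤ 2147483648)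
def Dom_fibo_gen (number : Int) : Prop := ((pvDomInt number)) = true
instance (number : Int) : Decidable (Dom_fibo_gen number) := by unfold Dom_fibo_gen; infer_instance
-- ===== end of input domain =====

-- B replaces A's running-product while-loops with per-position math.factorial calls (idiomatic; not faster).

-- ===== PORT A =====
-- A's yielding while-loop: while idx <= bound: result *= idx; yield result; idx += 1
def fiboWhileYield (idx result bound : Int) : List Int :=
  if idx ≤ bound then
    (result * idx) :: fiboWhileYield (idx + 1) (result * idx) bound
  else []
termination_by (bound + 1 - idx).toNat
decreasing_by omega

-- A's non-yielding while-loop: while idx <= bound: result *= idx; idx += 1; returns result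
def fiboWhileProd (idx result bound : Int) : Int :=
  if idx ≤ bound then fiboWhileProd (idx + 1) (result * idx) bound
  else result
termination_by (bound + 1 - idx).toNat
decreasing_by omega

def fibo_gen (number : Int) : List Int :=
  if number ≤ 15 then
    fiboWhileYield 1 1 number
  else
    fiboWhileYield 1 1 15 ++ [fiboWhileProd 16 (fiboWhileYield 1 1 15).getLast! number]

-- ===== PORT B =====
-- math.factorial on an int argument (arguments are ≥ 1 wherever B calls it)
def pyFactorial (i : Int) : Int := (Nat.factorial i.toNat : Int)

def fibo_gen_alt (number : Int) : List Int :=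
  if number ≤ 15 then
    (PySem.List.pyRange 1 (number + 1) 1).map pyFactorial
  else
    (PySem.List.pyRange 1 16 1).map pyFactorial ++ [pyFactorial number]

-- ===== PRECONDITION & SPEC =====
def Spec_fibo_gen (number : Int) (out : List Int) : Prop := out = fibo_gen_alt number
instance (number : Int) (out : List Int) : Decidable (Spec_fibo_gen number out) := by unfold Spec_fibo_gen; infer_instance

-- ===== CLAIM (what is proved, stated in full; the proofs are below) =====
def Claim_equal_fibo_gen : Prop := ∀ (number : Int), Dom_fibo_gen number → Spec_fibo_gen number (fibo_gen number)

-- ===== LEMMAS AND PROOFS =====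

theorem pyFactorial_succ (i : Int) (h : 1 ≤ i) :
    pyFactorial (i - 1) * i = pyFactorial i := by
  unfold pyFactorial
  have h1 : i.toNat = (i - 1).toNat + 1 := by omega
  have h2 : (i.toNat : Int) = i := by omega
  have h3 : ((i - 1).toNat : Int) = i - 1 := by omega
  rw [h1, Nat.factorial_succ]
  push_cast
  rw [h3]
  ring

theorem fiboWhileYield_eq (idx bound : Int) (h : 1 ≤ idx) :
    fiboWhileYield idx (pyFactorial (idx - 1)) bound
      = (PySem.List.pyRange idx (bound + 1) 1).map pyFactorial := by
  rw [fiboWhileYield]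
  split
  · next hle =>
    rw [PySem.List.pyRange_one_cons (by omega)]
    simp only [List.map_cons]
    rw [pyFactorial_succ idx h]
    have harg : idx + 1 - 1 = idx := by ring
    have ih := fiboWhileYield_eq (idx + 1) bound (by omega)
    rw [harg] at ih
    rw [ih]
  · next hgt =>
    have : PySem.List.pyRange idx (bound + 1) 1 = [] := by
      rw [PySem.List.pyRange_one]
      have : (bound + 1 - idx).toNat = 0 := by omega
      simp [this]
    simp [this]
termination_by (bound + 1 - idx).toNat
decreasing_by omega

theorem fiboWhileProd_eq (idx bound : Int) (h : 1 ≤ idx) (h2 : idx ≤ bound + 1) :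
    fiboWhileProd idx (pyFactorial (idx - 1)) bound = pyFactorial bound := by
  rw [fiboWhileProd]
  split
  · next hle =>
    have harg : idx + 1 - 1 = idx := by ring
    have ih := fiboWhileProd_eq (idx + 1) bound (by omega) (by omega)
    rw [harg] at ih
    rw [pyFactorial_succ idx h]
    exact ih
  · next hgt =>
    have : idx - 1 = bound := by omega
    rw [this]
termination_by (bound + 1 - idx).toNat
decreasing_by omega

theorem pyFactorial_zero : pyFactorial 0 = 1 := by decide

theorem fiboWhileYield_one (bound : Int) :
    fiboWhileYield 1 1 bound = (PySem.List.pyRange 1 (bound + 1) 1).map pyFactorial := by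
  have := fiboWhileYield_eq 1 bound (by omega)
  simpa [pyFactorial_zero] using this

-- ===== VERDICT (by name: the statement is the Claim_ definition above) =====
theorem fibo_gen_spec : Claim_equal_fibo_gen := by
  intro number _
  unfold Spec_fibo_gen fibo_gen fibo_gen_alt
  split
  · exact fiboWhileYield_one number
  · next hgt =>
    rw [fiboWhileYield_one]
    have h15 : (15 : Int) + 1 = 16 := by norm_num
    rw [h15]
    congr 1
    have hlast : ((PySem.List.pyRange 1 16 1).map pyFactorial).getLast! = pyFactorial 15 := by
      decide
    rw [hlast]
    have h16 : (16 : Int) - 1 = 15 := by norm_num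
    rw [← h16]
    rw [fiboWhileProd_eq 16 number (by omega) (by omega)]
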